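-- pv_equiv track=rewrite | github.com/wsinwsin/FaultTreeAnalysis | ft_bdd/check_coherent.py | _minimal
-- ===== SOURCE A (Python) =====
-- def _minimal(a):
--     #example: [[a,b],[a,b,c],[a,d]]→[[a,b],[a,d]]
--     a = [tuple(sorted(i)) for i in a]
--     a.sort(key=lambda t: len(t))
--     i = 0
--     while i < len(a):
--         for j in [k for k in a if len(k)>len(a[i])]:
--             if set(a[i])<set(j):
--                 a.remove(j)
--         i +=1
--     a = [list(i) for i in a]
--     return a
-- ===== SOURCE B (Python) =====
-- def _minimal(a):
--     # keep minimal sets: sort by length, precompute sets once, single declarative filter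
--     ts = sorted((tuple(sorted(x)) for x in a), key=len)
--     sets = [set(t) for t in ts]
--     out = []
--     for t, s in zip(ts, sets):
--         if not any(len(t2) < len(t) and s2 < s for t2, s2 in zip(ts, sets)):
--             out.append(list(t))
--     return out
-- ===== Notes on version B (the rewrite author's own statement) =====
-- stated objective: alternative
-- what changed: A repeatedly rebuilds sets inside a mutating while/remove loop over the shrinking list; B sorts by length once, precomputes each row's set once, and selects the surviving rows with a single declarative filter (a row is kept iff no row is a shorter strict subset of it), building the output instead of destroying the input list.
import Mathlib
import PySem

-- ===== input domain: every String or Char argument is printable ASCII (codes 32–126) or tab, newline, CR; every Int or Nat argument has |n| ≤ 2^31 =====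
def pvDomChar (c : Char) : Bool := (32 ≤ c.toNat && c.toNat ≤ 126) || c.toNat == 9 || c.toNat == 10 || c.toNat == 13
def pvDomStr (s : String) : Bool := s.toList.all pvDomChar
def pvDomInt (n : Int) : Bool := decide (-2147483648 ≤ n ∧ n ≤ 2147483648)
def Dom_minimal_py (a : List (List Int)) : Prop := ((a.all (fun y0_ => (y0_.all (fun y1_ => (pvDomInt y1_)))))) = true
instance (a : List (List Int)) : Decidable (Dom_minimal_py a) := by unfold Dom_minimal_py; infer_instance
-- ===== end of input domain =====

-- ===== PORT A =====
-- B precomputes each row's set once and selects minimal rows with one declarative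
-- pass over the length-sorted rows, instead of A's repeated set building and
-- in-place list.remove rebuilding (objective: alternative; same asymptotic cost).

-- Python's  s < t  on two built sets (proper subset)
def setLt (s t : PySem.Set Int) : Bool :=
  PySem.Set.issubset s t && !(PySem.Set.issubset t s)

-- inner loop body of A: 'if set(a[i]) < set(j): a.remove(j)'
def innerRemove (t : List Int) (acc : List (List Int)) (j : List Int) : List (List Int) :=
  if setLt (PySem.Set.ofList t) (PySem.Set.ofList j) then (PySem.List.remove? acc j).getD acc else acc

lemma length_innerRemove_le (t : List Int) (acc : List (List Int)) (j : List Int) :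
    (innerRemove t acc j).length ≤ acc.length := by
  unfold innerRemove PySem.List.remove?
  split
  · cases h : List.idxOf? j acc with
    | none => simp
    | some k => simp [List.length_eraseIdx]; split <;> omega
  · exact le_refl _

lemma length_foldl_le {β : Type} (g : List (List Int) → β → List (List Int))
    (hg : ∀ acc x, (g acc x).length ≤ acc.length) :
    ∀ (S : List β) (acc), ((S.foldl g acc)).length ≤ acc.length := by
  intro S
  induction S with
  | nil => intro acc; exact le_refl _
  | cons j S ih => intro acc; exact le_trans (ih (g acc j)) (hg acc j)

-- the while loop of A.  Python re-reads a[i] each inner step, but only strictly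
-- longer rows (which lie after index i in the length-sorted list) are ever removed,
-- so a[i] stays the same value t throughout the inner loop.
def minimalLoop (a : List (List Int)) (i : Nat) : List (List Int) :=
  if h : i < a.length then
    let t := a[i]
    minimalLoop ((a.filter (fun k => decide (t.length < k.length))).foldl (innerRemove t) a) (i + 1)
  else a
termination_by a.length - i
decreasing_by
  exact Nat.lt_of_le_of_lt
    (Nat.sub_le_sub_right (length_foldl_le _ (fun acc x => length_innerRemove_le _ acc _) _ a) (i + 1))
    (by omega)

def minimal_py (a : List (List Int)) : List (List Int) :=
  let a1 := a.map (fun i => PySem.List.sorted i (fun x => x))      -- [tuple(sorted(i)) for i in a]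
  let a2 := PySem.List.sorted a1 (fun t => t.length)               -- a.sort(key=len)
  (minimalLoop a2 0).map (fun i => i)                              -- [list(i) for i in a] (tuple = list here)

-- ===== PORT B =====
def minimal_py_alt (a : List (List Int)) : List (List Int) :=
  let ts := PySem.List.sorted (a.map (fun x => PySem.List.sorted x (fun v => v))) (fun t => t.length)
  let sets := ts.map (fun t => PySem.Set.ofList t)
  (ts.zip sets).foldl (fun out p =>
    if !((ts.zip sets).any (fun q => decide (q.1.length < p.1.length) && setLt q.2 p.2))
    then out ++ [p.1] else out) []

-- ===== PRECONDITION & SPEC =====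
def Spec_minimal_py (a : List (List Int)) (out : List (List Int)) : Prop := out = minimal_py_alt a
instance (a : List (List Int)) (out : List (List Int)) : Decidable (Spec_minimal_py a out) := by unfold Spec_minimal_py; infer_instance

-- ===== CLAIM (what is proved, stated in full; the proofs are below) =====
def Claim_equal_minimal_py : Prop := ∀ (a : List (List Int)), Dom_minimal_py a → Spec_minimal_py a (minimal_py a)

-- ===== LEMMAS AND PROOFS =====

-- a row j is kept while processing row s:  not (len s < len j and set(s) < set(j))
def keepRow (s j : List Int) : Bool :=
  !(decide (s.length < j.length) && setLt (PySem.Set.ofList s) (PySem.Set.ofList j))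

-- a row t survives the whole algorithm iff no row of L is a shorter strict subset of it
def surv (L : List (List Int)) (t : List Int) : Bool := L.all (fun s => keepRow s t)

lemma issubset_iff (s t : List Int) : PySem.Set.issubset s t = true ↔ ∀ x ∈ s, x ∈ t := by
  simp [PySem.Set.issubset, PySem.Set.contains]

lemma setLt_trans {s t u : List Int} (h1 : setLt s t = true) (h2 : setLt t u = true) :
    setLt s u = true := by
  unfold setLt at *
  rcases Bool.and_eq_true_iff.mp h1 with ⟨h1a, h1b⟩
  rcases Bool.and_eq_true_iff.mp h2 with ⟨h2a, h2b⟩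
  rw [issubset_iff] at h1a h2a
  apply Bool.and_eq_true_iff.mpr
  constructor
  · exact (issubset_iff _ _).mpr (fun x hx => h2a x (h1a x hx))
  · simp only [Bool.not_eq_true'] at h1b ⊢
    by_contra hus
    simp only [Bool.not_eq_false] at hus
    rw [issubset_iff] at hus
    have : PySem.Set.issubset t s = true :=
      (issubset_iff _ _).mpr (fun x hx => hus x (h2a x hx))
    rw [this] at h1b; exact Bool.noConfusion h1b

lemma keepRow_self (t : List Int) : keepRow t t = true := by
  simp [keepRow]

lemma minimalLoop_pos (a : List (List Int)) (i : Nat) (h : i < a.length) :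
    minimalLoop a i
      = minimalLoop ((a.filter (fun k => decide (a[i].length < k.length))).foldl (innerRemove a[i]) a) (i + 1) := by
  conv_lhs => unfold minimalLoop
  rw [dif_pos h]

lemma minimalLoop_neg (a : List (List Int)) (i : Nat) (h : ¬ i < a.length) :
    minimalLoop a i = a := by
  conv_lhs => unfold minimalLoop
  rw [dif_neg h]

lemma zip_map_self {α β : Type} (f : α → β) (l : List α) :
    l.zip (l.map f) = l.map (fun x => (x, f x)) := by
  induction l with
  | nil => rfl
  | cons x l ih => simp [ih]

-- skipping removals of values distinct from the head leaves the head in place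
lemma foldl_remove_skip (x : List Int) :
    ∀ (S acc : List (List Int)), (∀ j ∈ S, j ≠ x) →
      S.foldl (fun acc j => (PySem.List.remove? acc j).getD acc) (x :: acc)
        = x :: S.foldl (fun acc j => (PySem.List.remove? acc j).getD acc) acc := by
  intro S
  induction S with
  | nil => intro acc _; rfl
  | cons j S ih =>
      intro acc hne
      have hjx : x ≠ j := fun h => hne j (List.mem_cons_self) h.symm
      simp only [List.foldl_cons, PySem.List.remove?_cons_of_ne acc hjx]
      cases h : PySem.List.remove? acc j with
      | none => simpa [h] using ih acc (fun j hj => hne j (List.mem_cons_of_mem _ hj))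
      | some l => simpa [h] using ih l (fun j hj => hne j (List.mem_cons_of_mem _ hj))

-- removing (first occurrence of) every row of a.filter q from a leaves a.filter (not q)
lemma foldl_remove_filter (q : List Int → Bool) :
    ∀ (a : List (List Int)),
      (a.filter q).foldl (fun acc j => (PySem.List.remove? acc j).getD acc) a
        = a.filter (fun x => !q x) := by
  intro a
  induction a with
  | nil => rfl
  | cons x a ih =>
      by_cases hq : q x = true
      · rw [List.filter_cons_of_pos hq]
        simp only [List.foldl_cons, PySem.List.remove?_cons_self, Option.getD_some]
        rw [ih, List.filter_cons_of_neg (by simp [hq])]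
      · rw [List.filter_cons_of_neg (by simpa using hq)]
        have hne : ∀ j ∈ a.filter q, j ≠ x := by
          intro j hj hjx
          exact hq (hjx ▸ (List.of_mem_filter hj))
        rw [foldl_remove_skip x _ a hne, ih,
          List.filter_cons_of_pos (by simp [hq])]

-- conditional body = unconditional removal over the further-filtered list
lemma foldl_if_filter {α β : Type} (c : α → Bool) (f : β → α → β) :
    ∀ (S : List α) (acc : β),
      S.foldl (fun acc j => if c j then f acc j else acc) acc = (S.filter c).foldl f acc := by
  intro S
  induction S with
  | nil => intro acc; rfl
  | cons j S ih =>
      intro acc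
      by_cases hc : c j = true
      · rw [List.filter_cons_of_pos hc]; simp only [List.foldl_cons, if_pos hc, ih]
      · rw [List.filter_cons_of_neg (by simpa using hc)]
        simp only [List.foldl_cons, if_neg hc, ih]

-- one pass of A's inner loop is a filter
lemma inner_eq_filter (t : List Int) (a : List (List Int)) :
    (a.filter (fun k => decide (t.length < k.length))).foldl (innerRemove t) a
      = a.filter (keepRow t) := by
  unfold innerRemove
  rw [foldl_if_filter, List.filter_filter]
  have := foldl_remove_filter
    (fun j => decide (t.length < j.length) && setLt (PySem.Set.ofList t) (PySem.Set.ofList j)) a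
  rw [show (fun a_1 => setLt (PySem.Set.ofList t) (PySem.Set.ofList a_1)
        && decide (t.length < a_1.length))
      = (fun j => decide (t.length < j.length) && setLt (PySem.Set.ofList t) (PySem.Set.ofList j))
    from funext (fun j => Bool.and_comm _ _), this]
  exact List.filter_congr (fun x _ => rfl)

lemma loop_eq_filter :
    ∀ (n i : Nat) (a : List (List Int)),
      a.length - i ≤ n →
      i ≤ a.length →
      a.Pairwise (fun s t => s.length ≤ t.length) →
      (∀ s ∈ a.take i, ∀ j ∈ a, keepRow s j = true) →
      minimalLoop a i = a.filter (surv a) := by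
  intro n
  induction n with
  | zero =>
      intro i a hfuel hi _ hinv
      have hia : i = a.length := by omega
      rw [minimalLoop_neg a i (by omega)]
      symm
      apply List.filter_eq_self.mpr
      intro t ht
      simp only [surv, List.all_eq_true]
      intro s hs
      exact hinv s (by rw [hia, List.take_length]; exact hs) t ht
  | succ n ih =>
      intro i a hfuel hi hpair hinv
      by_cases h : i < a.length
      · rw [minimalLoop_pos a i h]
        set t := a[i] with ht
        rw [inner_eq_filter]
        set a' := a.filter (keepRow t) with ha'
        -- every row of the (i+1)-prefix is kept by the filter
        have hpre : ∀ x ∈ a.take (i + 1), keepRow t x = true := by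
          intro x hx
          rcases List.mem_take_iff_getElem.mp hx with ⟨k, hk, hxk⟩
          have hk' : k < a.length := lt_of_lt_of_le (Nat.lt_min.mp hk).2 (le_refl _)
          rcases Nat.lt_succ_iff_lt_or_eq.mp (Nat.lt_min.mp hk).1 with hki | hki
          · have hlen : a[k].length ≤ a[i].length :=
              List.pairwise_iff_getElem.mp hpair k i hk' h hki
            subst hxk
            simp only [keepRow, Bool.not_eq_true', Bool.and_eq_false_iff]
            left; simp; omega
          · subst hki; rw [← hxk]; exact keepRow_self t
        have hsplit : a' = a.take (i + 1) ++ (a.drop (i + 1)).filter (keepRow t) := by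
          conv_lhs => rw [ha', ← List.take_append_drop (i + 1) a]
          rw [List.filter_append, List.filter_eq_self.mpr hpre]
        have hlen' : i + 1 ≤ a'.length := by
          rw [hsplit, List.length_append, List.length_take]
          omega
        have htake' : a'.take (i + 1) = a.take (i + 1) := by
          rw [hsplit, List.take_append_of_le_length (by rw [List.length_take]; omega),
            List.take_take]
          congr 1; omega
        have hsub : ∀ j, j ∈ a' → j ∈ a := fun j hj => List.mem_of_mem_filter hj
        have hta' : t ∈ a' := by
          rw [ha']
          exact List.mem_filter.mpr ⟨List.getElem_mem h, keepRow_self t⟩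
        -- the survivor predicate is unchanged by the filter step
        have hsurv : ∀ x, surv a' x = surv a x := by
          intro x
          rw [Bool.eq_iff_iff]
          simp only [surv, List.all_eq_true]
          constructor
          · intro hall s hs
            by_cases hk : keepRow s x = true
            · exact hk
            · exfalso
              by_cases hts : keepRow t s = true
              · exact hk (hall s (List.mem_filter.mpr ⟨hs, hts⟩))
              · -- t is a shorter strict subset of s, hence of x; but t ∈ a'
                have htsf : (decide (t.length < s.length)
                    && setLt (PySem.Set.ofList t) (PySem.Set.ofList s)) = true := by
                  have hf : keepRow t s = false := by simpa using hts
                  simpa [keepRow] using hf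
                rcases Bool.and_eq_true_iff.mp htsf with ⟨hl1, hl2⟩
                have hkx : (decide (s.length < x.length)
                    && setLt (PySem.Set.ofList s) (PySem.Set.ofList x)) = true := by
                  have hf : keepRow s x = false := by simpa using hk
                  simpa [keepRow] using hf
                rcases Bool.and_eq_true_iff.mp hkx with ⟨hl3, hl4⟩
                have htx : keepRow t x = false := by
                  simp only [keepRow, Bool.not_eq_false']
                  apply Bool.and_eq_true_iff.mpr
                  refine ⟨?_, setLt_trans hl2 hl4⟩
                  simp only [decide_eq_true_eq] at hl1 hl3 ⊢
                  omega
                have hkt := hall t hta'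
                rw [htx] at hkt
                exact Bool.noConfusion hkt
          · intro hall s hs
            exact hall s (hsub s hs)
        have hstep : a'.filter (surv a') = a.filter (surv a) := by
          rw [List.filter_congr (fun x _ => hsurv x), ha', List.filter_filter]
          apply List.filter_congr
          intro x hx
          by_cases hsx : surv a x = true
          · have hkt : keepRow t x = true :=
              List.all_eq_true.mp (by simpa [surv] using hsx) t (List.getElem_mem h)
            simp [hsx, hkt]
          · rw [Bool.not_eq_true] at hsx
            simp [hsx]
        rw [← hstep]
        apply ih (i + 1) a'
        · have := List.length_filter_le (keepRow t) a
          rw [← ha'] at this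
          omega
        · exact hlen'
        · exact List.Pairwise.filter _ hpair
        · intro s hs j hj
          rw [htake', List.take_add_one] at hs
          rcases List.mem_append.mp hs with hs | hs
          · exact hinv s hs j (hsub j hj)
          · have hst : s = t := by
              have : a[i]? = some t := by rw [List.getElem?_eq_getElem h]
              rw [this] at hs
              simpa using hs
            subst hst
            exact List.of_mem_filter hj
      · rw [minimalLoop_neg a i h]
        symm
        apply List.filter_eq_self.mpr
        intro x hx
        simp only [surv, List.all_eq_true]
        intro s hs
        have hia : i = a.length := by omega
        exact hinv s (by rw [hia, List.take_length]; exact hs) x hx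

-- ===== VERDICT (by name: the statement is the Claim_ definition above) =====
theorem minimal_py_spec : Claim_equal_minimal_py := by
  intro a _
  unfold Spec_minimal_py minimal_py minimal_py_alt
  simp only
  set ts := PySem.List.sorted (a.map (fun x => PySem.List.sorted x (fun v => v))) (fun t => t.length) with hts
  have hA : minimalLoop ts 0 = ts.filter (surv ts) := by
    apply loop_eq_filter ts.length 0 ts (by omega) (by omega)
    · exact PySem.List.sorted_pairwise _ _
    · intro s hs; simp at hs
  rw [hA, zip_map_self, PySem.List.foldl_append_if, List.nil_append, List.filter_map,
    List.map_map]
  simp only [Function.comp_def, List.map_id']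
  apply List.filter_congr
  intro x hx
  rw [Bool.eq_iff_iff]
  simp only [surv, keepRow, List.any_map, List.all_eq_true, Bool.not_eq_true',
    List.any_eq_false, Function.comp_apply, Bool.and_eq_false_iff]
  constructor
  · intro hall s hs
    rcases hall s hs with h | h <;> simp [h]
  · intro hall s hs
    have h := hall s hs
    cases hc : decide (s.length < x.length) with
    | false => left; rfl
    | true =>
        right
        cases hsl : setLt (PySem.Set.ofList s) (PySem.Set.ofList x) with
        | false => rfl
        | true => exact absurd (by rw [hc, hsl]; rfl) h
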